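-- pv_equiv track=rewrite | github.com/hxssgaa/deepcode | js/ut_gen.py | _get_instance_name_by_class
-- ===== SOURCE A (Python) =====
-- def _get_instance_name_by_class(class_name):
--     if not class_name:
--         return class_name
--     class_name = class_name.strip()
--     if class_name[0].islower() or len(class_name) == 1:
--         return class_name
--     elif class_name[1].islower():
--         return class_name[0].lower() + class_name[1:]
--     s = []
--     index = 0
--     while index < len(class_name) - 1:
--         if class_name[index + 1].islower():
--             break
--         else:
--             s.append(class_name[index].lower())
--         index += 1
--     return '%s%s' % (''.join(s), class_name[index:])
-- ===== SOURCE B (Python) =====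
-- def _get_instance_name_by_class(class_name):
--     if not class_name:
--         return class_name
--     class_name = class_name.strip()
--     if class_name[0].islower() or len(class_name) == 1:
--         return class_name
--     i = next((j for j in range(1, len(class_name)) if class_name[j].islower()),
--              len(class_name))
--     k = max(1, i - 1)
--     return class_name[:k].lower() + class_name[k:]
-- ===== Notes on version B (the rewrite author's own statement) =====
-- stated objective: simpler
-- what changed: Replaces A's incremental list-building while-loop and its separate elif branch by computing a single cut index k (first lowercase position after index 0, adjusted by max(1, i-1)) and returning class_name[:k].lower() + class_name[k:].
import Mathlib
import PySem

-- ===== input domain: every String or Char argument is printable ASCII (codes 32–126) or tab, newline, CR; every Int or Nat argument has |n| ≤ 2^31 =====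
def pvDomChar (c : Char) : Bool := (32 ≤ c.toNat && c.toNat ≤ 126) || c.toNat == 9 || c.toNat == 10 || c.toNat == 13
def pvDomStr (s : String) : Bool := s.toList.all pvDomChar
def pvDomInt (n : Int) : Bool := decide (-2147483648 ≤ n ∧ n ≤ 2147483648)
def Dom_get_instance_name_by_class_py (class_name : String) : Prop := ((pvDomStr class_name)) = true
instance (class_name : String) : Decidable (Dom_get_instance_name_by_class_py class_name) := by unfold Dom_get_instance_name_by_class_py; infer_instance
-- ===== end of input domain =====

-- B replaces A's list-building while-loop and its separate elif branch by computing the single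
-- cut point k (first lowercase position, adjusted) and returning s[:k].lower() + s[k:] (objective: simpler).

-- ===== PORT A =====
-- A's while-loop: while index < len(cs) - 1: if cs[index+1].islower(): break
--                 else: s.append(cs[index].lower()); index += 1   — returns final (s, index).
-- (cs.getD makes the in-range Python indexing total; indices stay in range on every reached call)
def pvALoop (cs : List Char) (index : Nat) (s : List Char) : List Char × Nat :=
  if _h : index < cs.length - 1 then
    if PySem.Chars.islower (cs.getD (index + 1) ' ') then (s, index)
    else pvALoop cs (index + 1) (s ++ [PySem.Chars.lowerChar (cs.getD index ' ')])
  else (s, index)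
termination_by cs.length - index
decreasing_by omega

def get_instance_name_by_class_py (class_name : String) : String :=
  if class_name.toList = [] then class_name
  else
    let cs := PySem.Chars.strip class_name.toList
    if PySem.Chars.islower (cs.getD 0 ' ') = true ∨ cs.length = 1 then String.ofList cs
    else if PySem.Chars.islower (cs.getD 1 ' ') = true then
      String.ofList (PySem.Chars.lowerChar (cs.getD 0 ' ') :: cs.drop 1)
    else
      let r := pvALoop cs 0 []
      String.ofList (r.1 ++ cs.drop r.2)

-- ===== PORT B =====
-- B's generator scan: first index j ≥ start with cs[j] lowercase, default cs.length
def pvBFind (cs : List Char) (j : Nat) : Nat :=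
  if h : j < cs.length then
    if PySem.Chars.islower cs[j] then j else pvBFind cs (j + 1)
  else cs.length
termination_by cs.length - j
decreasing_by omega

def get_instance_name_by_class_py_alt (class_name : String) : String :=
  if class_name.toList = [] then class_name
  else
    let cs := PySem.Chars.strip class_name.toList
    if PySem.Chars.islower (cs.getD 0 ' ') = true ∨ cs.length = 1 then String.ofList cs
    else
      let k := max 1 (pvBFind cs 1 - 1)
      String.ofList (PySem.Chars.lower (cs.take k) ++ cs.drop k)

-- ===== PRECONDITION & SPEC =====
-- Pre_ excludes exactly the nonempty all-whitespace inputs: there Python A raises IndexError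
-- (class_name.strip() is empty and class_name[0] is read); B raises the same way.
def Pre_get_instance_name_by_class_py (class_name : String) : Prop :=
  class_name.toList = [] ∨ PySem.Chars.strip class_name.toList ≠ []
instance (class_name : String) : Decidable (Pre_get_instance_name_by_class_py class_name) := by
  unfold Pre_get_instance_name_by_class_py; infer_instance

def pvWitness_get_instance_name_by_class_py : String := "AB"

def Spec_get_instance_name_by_class_py (class_name : String) (out : String) : Prop :=
  out = get_instance_name_by_class_py_alt class_name
instance (class_name : String) (out : String) : Decidable (Spec_get_instance_name_by_class_py class_name out) := by
  unfold Spec_get_instance_name_by_class_py; infer_instance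

-- ===== CLAIM (what is proved, stated in full; the proofs are below) =====
def Claim_equal_get_instance_name_by_class_py : Prop :=
  ∀ (class_name : String), Dom_get_instance_name_by_class_py class_name →
    Pre_get_instance_name_by_class_py class_name →
    Spec_get_instance_name_by_class_py class_name (get_instance_name_by_class_py class_name)

-- ===== LEMMAS AND PROOFS =====

-- the cut index A's loop ends at, expressed through B's scan
def pvE (cs : List Char) (index : Nat) : Nat :=
  min (pvBFind cs (index + 1) - 1) (cs.length - 1)

lemma pvBFind_le (cs : List Char) : ∀ n j, cs.length - j ≤ n → pvBFind cs j ≤ cs.length := by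
  intro n
  induction n with
  | zero =>
    intro j hj
    rw [pvBFind, dif_neg (by omega)]
  | succ n ih =>
    intro j hj
    rw [pvBFind]
    by_cases h : j < cs.length
    · rw [dif_pos h]
      by_cases hl : PySem.Chars.islower cs[j] = true
      · rw [if_pos hl]; omega
      · rw [if_neg hl]; exact ih (j + 1) (by omega)
    · rw [dif_neg h]

lemma pvBFind_ge (cs : List Char) : ∀ n j, cs.length - j ≤ n → j ≤ cs.length → j ≤ pvBFind cs j := by
  intro n
  induction n with
  | zero =>
    intro j hj hle
    rw [pvBFind, dif_neg (by omega)]; omega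
  | succ n ih =>
    intro j hj hle
    rw [pvBFind]
    by_cases h : j < cs.length
    · rw [dif_pos h]
      by_cases hl : PySem.Chars.islower cs[j] = true
      · rw [if_pos hl]
      · rw [if_neg hl]
        have := ih (j + 1) (by omega) (by omega)
        omega
    · rw [dif_neg h]; omega

lemma pvALoop_eq (cs : List Char) :
    ∀ n index s, cs.length - index ≤ n → index < cs.length →
      pvALoop cs index s =
        (s ++ ((cs.take (pvE cs index)).drop index).map PySem.Chars.lowerChar, pvE cs index) := by
  intro n
  induction n with
  | zero => intro index s hn hlt; omega
  | succ n ih =>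
    intro index s hn hlt
    rw [pvALoop]
    by_cases h : index < cs.length - 1
    · rw [dif_pos h]
      have h1 : index + 1 < cs.length := by omega
      rw [List.getD_eq_getElem cs ' ' h1]
      by_cases hl : PySem.Chars.islower cs[index + 1] = true
      · rw [if_pos hl]
        have he : pvE cs index = index := by
          unfold pvE
          have hf : pvBFind cs (index + 1) = index + 1 := by
            rw [pvBFind, dif_pos h1, if_pos hl]
          rw [hf]; omega
        rw [he]
        have hd : (cs.take index).drop index = [] :=
          List.drop_eq_nil_of_le (by simp)
        rw [hd]; simp
      · rw [if_neg hl]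
        have hfix : pvBFind cs (index + 1) = pvBFind cs (index + 2) := by
          conv_lhs => rw [pvBFind]
          rw [dif_pos h1, if_neg hl]
        have hee : pvE cs index = pvE cs (index + 1) := by
          unfold pvE
          rw [show index + 1 + 1 = index + 2 from by omega, hfix]
        have hge : index + 1 ≤ pvE cs index := by
          have hg := pvBFind_ge cs cs.length (index + 2) (by omega) (by omega)
          unfold pvE; rw [hfix]
          omega
        rw [ih (index + 1) (s ++ [PySem.Chars.lowerChar (cs.getD index ' ')]) (by omega) (by omega)]
        rw [← hee]
        have hlenE : pvE cs index ≤ cs.length - 1 := by unfold pvE; omega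
        refine Prod.ext ?_ rfl
        rw [List.getD_eq_getElem cs ' ' (by omega)]
        have hlt' : index < (cs.take (pvE cs index)).length := by
          simp only [List.length_take]
          omega
        have hdrop : (cs.take (pvE cs index)).drop index
            = cs[index] :: (cs.take (pvE cs index)).drop (index + 1) := by
          rw [List.drop_eq_getElem_cons hlt']
          congr 1
          simp
        rw [hdrop]
        simp
    · rw [dif_neg h]
      have he : pvE cs index = index := by
        unfold pvE
        have hf : pvBFind cs (index + 1) = cs.length := by
          rw [pvBFind, dif_neg (by omega)]
        rw [hf]; omega
      rw [he]
      have hd : (cs.take index).drop index = [] :=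
        List.drop_eq_nil_of_le (by simp)
      rw [hd]; simp

-- ===== VERDICT (by name: the statement is the Claim_ definition above) =====
theorem get_instance_name_by_class_py_spec : Claim_equal_get_instance_name_by_class_py := by
  intro class_name _ hpre
  unfold Spec_get_instance_name_by_class_py
  unfold get_instance_name_by_class_py get_instance_name_by_class_py_alt
  by_cases hnil : class_name.toList = []
  · rw [if_pos hnil, if_pos hnil]
  · rw [if_neg hnil, if_neg hnil]
    unfold Pre_get_instance_name_by_class_py at hpre
    set cs := PySem.Chars.strip class_name.toList with hcs
    have hne : cs ≠ [] := by
      rcases hpre with h | h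
      · exact absurd h hnil
      · exact h
    obtain ⟨c, t, hct⟩ := List.exists_cons_of_ne_nil hne
    have hlen1 : 1 ≤ cs.length := by rw [hct]; simp
    by_cases hc1 : PySem.Chars.islower (cs.getD 0 ' ') = true ∨ cs.length = 1
    · rw [if_pos hc1, if_pos hc1]
    · rw [if_neg hc1, if_neg hc1]
      have hlen2 : 2 ≤ cs.length := by
        rcases Nat.lt_or_ge cs.length 2 with h | h
        · exact absurd (Or.inr (by omega)) hc1
        · exact h
      have h1lt : 1 < cs.length := by omega
      by_cases hl1 : PySem.Chars.islower (cs.getD 1 ' ') = true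
      · rw [if_pos hl1]
        have hf : pvBFind cs 1 = 1 := by
          conv_lhs => rw [pvBFind]
          rw [List.getD_eq_getElem cs ' ' h1lt] at hl1
          rw [dif_pos h1lt, if_pos hl1]
        rw [hf]
        congr 1
        rw [hct]
        simp [PySem.Chars.lower]
      · rw [if_neg hl1]
        have hl1' : ¬ PySem.Chars.islower cs[1] = true := by
          rw [List.getD_eq_getElem cs ' ' h1lt] at hl1
          exact hl1
        have hstep : pvBFind cs 1 = pvBFind cs 2 := by
          conv_lhs => rw [pvBFind]
          rw [dif_pos h1lt, if_neg hl1']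
        have hge : 2 ≤ pvBFind cs 1 := by
          rw [hstep]
          exact pvBFind_ge cs cs.length 2 (by omega) (by omega)
        have hle : pvBFind cs 1 ≤ cs.length := pvBFind_le cs cs.length 1 (by omega)
        have hloop := pvALoop_eq cs cs.length 0 [] (by omega) (by omega)
        have he : pvE cs 0 = pvBFind cs 1 - 1 := by
          unfold pvE
          simp only [Nat.zero_add]
          omega
        have hk : max 1 (pvBFind cs 1 - 1) = pvBFind cs 1 - 1 := by omega
        simp only [hloop, hk, he, List.nil_append, List.drop_zero]
        congr 1
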